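-- pv_equiv track=rewrite | github.com/sunilkumarc/100 | HackerEarth-CodeArena/fight3.py | setLedState
-- ===== SOURCE A (Python) =====
-- def setLedState(n, L):
--     state = [0] * L
--     off = 1
--     i = 0
--     while i < L:
--         if off == 1:
--             i += n
--             off = 0
--         else:
--             j = 0
--             while i < L and j < n:
--                 state[i] = 1
--                 j += 1
--                 i += 1
--             off = 1
--
--     return state
-- ===== SOURCE B (Python) =====
-- def setLedState(n, L):
--     return [(i // n) % 2 for i in range(L)]
-- ===== Notes on version B (the rewrite author's own statement) =====
-- stated objective: simpler
-- what changed: Replaced the off-flag state machine with nested block-filling while loops by a one-line closed form: element i is (i // n) % 2, since block index i//n is odd exactly on the 'on' blocks.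
import Mathlib
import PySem

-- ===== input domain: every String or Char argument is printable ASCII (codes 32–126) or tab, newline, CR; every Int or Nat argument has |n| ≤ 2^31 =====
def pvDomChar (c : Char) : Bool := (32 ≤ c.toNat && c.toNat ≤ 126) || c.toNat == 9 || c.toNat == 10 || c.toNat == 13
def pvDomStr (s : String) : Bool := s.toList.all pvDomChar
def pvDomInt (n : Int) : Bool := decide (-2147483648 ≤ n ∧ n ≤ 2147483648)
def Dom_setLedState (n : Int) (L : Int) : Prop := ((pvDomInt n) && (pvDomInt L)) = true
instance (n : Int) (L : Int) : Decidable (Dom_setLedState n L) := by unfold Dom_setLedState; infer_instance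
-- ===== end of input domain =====

-- B replaces A's off-flag state machine (skip n, fill n ones, repeat) by the per-index
-- closed form (i // n) % 2; equivalence is claimed on n ≥ 1 ∨ L ≤ 0 (elsewhere A diverges).

-- ===== PORT A =====
-- inner 'while i < L and j < n: state[i] = 1; j += 1; i += 1', returning (state, i).
-- The fuel only makes the recursion structural: it never runs out ((L-i).toNat bounds the trip count).
def pvInnerA (n L : Int) : Nat → List Int → Int → Int → List Int × Int
  | 0, state, i, _ => (state, i)
  | fuel + 1, state, i, j =>
    if i < L ∧ j < n then pvInnerA n L fuel (state.set i.toNat 1) (i + 1) (j + 1)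
    else (state, i)

-- outer 'while i < L: …'; fuel exhaustion only happens where the Python loop never
-- terminates (n ≤ 0 with i < L) — a totality guard, outside Pre_.
def pvOuterA (n L : Int) : Nat → List Int → Int → Int → List Int
  | 0, state, _, _ => state
  | fuel + 1, state, i, off =>
    if i < L then
      if off = 1 then pvOuterA n L fuel state (i + n) 0
      else
        pvOuterA n L fuel (pvInnerA n L (L - i).toNat state i 0).1
          (pvInnerA n L (L - i).toNat state i 0).2 1
    else state

def setLedState (n : Int) (L : Int) : List Int :=
  pvOuterA n L (2 * L.toNat + 1) (List.replicate L.toNat 0) 0 1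

-- ===== PORT B =====
def setLedState_alt (n : Int) (L : Int) : List Int :=
  (PySem.List.pyRange 0 L 1).map (fun i => PySem.Int.mod (PySem.Int.floordiv i n) 2)

-- ===== PRECONDITION & SPEC =====
-- Pre_ excludes n ≤ 0 with 0 < L: there A's outer loop never terminates (no value is returned).
def Pre_setLedState (n : Int) (L : Int) : Prop := 1 ≤ n ∨ L ≤ 0
instance (n : Int) (L : Int) : Decidable (Pre_setLedState n L) := by unfold Pre_setLedState; infer_instance
def pvWitness_setLedState : Int × Int := (3, 10)

def Spec_setLedState (n : Int) (L : Int) (out : List Int) : Prop := out = setLedState_alt n L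
instance (n : Int) (L : Int) (out : List Int) : Decidable (Spec_setLedState n L out) := by unfold Spec_setLedState; infer_instance

-- ===== CLAIM (what is proved, stated in full; the proofs are below) =====
def Claim_equal_setLedState : Prop := ∀ (n : Int) (L : Int), Dom_setLedState n L → Pre_setLedState n L → Spec_setLedState n L (setLedState n L)

-- ===== LEMMAS AND PROOFS =====

-- the per-index value B computes
def pvTgt (n k : Int) : Int := PySem.Int.mod (PySem.Int.floordiv k n) 2

theorem pvTgt_zero (n t k : Int) (hn : 1 ≤ n) (h1 : 2 * n * t ≤ k) (h2 : k < 2 * n * t + n) :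
    pvTgt n k = 0 := by
  have hd : PySem.Int.floordiv k n = 2 * t := by
    rw [PySem.Int.floordiv_eq_iff_of_pos (by omega)]
    constructor <;> nlinarith
  unfold pvTgt
  rw [hd, PySem.Int.mod_eq_emod_of_pos (by omega)]
  omega

theorem pvTgt_one (n t k : Int) (hn : 1 ≤ n) (h1 : 2 * n * t + n ≤ k) (h2 : k < 2 * n * t + 2 * n) :
    pvTgt n k = 1 := by
  have hd : PySem.Int.floordiv k n = 2 * t + 1 := by
    rw [PySem.Int.floordiv_eq_iff_of_pos (by omega)]
    constructor <;> nlinarith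
  unfold pvTgt
  rw [hd, PySem.Int.mod_eq_emod_of_pos (by omega)]
  omega

theorem pv_list_eq_target (L : Int) (f : Int → Int) (state : List Int)
    (hlen : state.length = L.toNat)
    (h : ∀ k : Nat, k < state.length → state[k]! = f k) :
    state = (List.range L.toNat).map (fun k : Nat => f (k : Int)) := by
  apply List.ext_getElem
  · simp [hlen]
  · intro k h1 h2
    have := h k h1
    rw [getElem!_pos state k h1] at this
    rw [this, List.getElem_map, List.getElem_range]

theorem pvInnerA_spec (n L : Int) (fuel : Nat) :
    ∀ (state : List Int) (i j : Int), 0 ≤ i → (L - i).toNat ≤ fuel →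
    (pvInnerA n L fuel state i j).1.length = state.length ∧
    (pvInnerA n L fuel state i j).2 = max i (min (i + (n - j)) L) ∧
    (∀ k : Nat, k < state.length →
      (pvInnerA n L fuel state i j).1[k]! =
        if i ≤ (k : Int) ∧ (k : Int) < max i (min (i + (n - j)) L) then 1 else state[k]!) := by
  induction fuel with
  | zero =>
    intro state i j hi hf
    refine ⟨rfl, ?_, ?_⟩
    · show i = max i (min (i + (n - j)) L)
      omega
    · intro k hk
      show state[k]! = _
      rw [if_neg (by omega)]
  | succ fuel IH =>
    intro state i j hi hf
    by_cases h : i < L ∧ j < n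
    · obtain ⟨hiL, hjn⟩ := h
      have hstep : pvInnerA n L (fuel + 1) state i j
          = pvInnerA n L fuel (state.set i.toNat 1) (i + 1) (j + 1) := by
        simp [pvInnerA, hiL, hjn]
      obtain ⟨IH1, IH2, IH3⟩ := IH (state.set i.toNat 1) (i + 1) (j + 1) (by omega) (by omega)
      rw [hstep]
      refine ⟨by simpa using IH1, by rw [IH2]; omega, ?_⟩
      intro k hk
      have hk' : k < (state.set i.toNat 1).length := by simpa using hk
      rw [IH3 k hk']
      have hset : (state.set i.toNat 1)[k]! = if (k : Int) = i then 1 else state[k]! := by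
        rw [getElem!_pos (state.set i.toNat 1) k hk', getElem!_pos state k hk, List.getElem_set]
        split_ifs <;> first | rfl | omega
      rw [hset]
      split_ifs <;> first | rfl | omega
    · have hstep : pvInnerA n L (fuel + 1) state i j = (state, i) := by
        simp only [pvInnerA, if_neg h]
      rw [hstep]
      refine ⟨rfl, by simp; omega, ?_⟩
      intro k hk
      rw [if_neg (by omega)]

theorem pvOuterA_stop (n L : Int) (fuel : Nat) (state : List Int) (i off : Int) (h : ¬ i < L) :
    pvOuterA n L fuel state i off = state := by
  cases fuel with
  | zero => rfl
  | succ fuel => simp [pvOuterA, h]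

theorem pvOuterA_eq (n L : Int) (hn : 1 ≤ n) (fuel : Nat) :
    ∀ (i t : Int) (state : List Int), 0 ≤ t → i = 2 * n * t →
    2 * (L - i).toNat + 1 ≤ fuel →
    state.length = L.toNat →
    (∀ k : Nat, k < state.length →
      state[k]! = if (k : Int) < i then pvTgt n (k : Int) else 0) →
    pvOuterA n L fuel state i 1 = (List.range L.toNat).map (fun k : Nat => pvTgt n (k : Int)) := by
  induction fuel using Nat.strong_induction_on with
  | _ fuel IH =>
  intro i t state ht hit hf hlen hinv
  have hi0 : 0 ≤ i := by nlinarith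
  by_cases hiL : i < L
  · -- two outer iterations: skip n (off := 0), then fill up to n ones (off := 1)
    obtain ⟨f, rfl⟩ : ∃ f, fuel = f + 2 := ⟨fuel - 2, by omega⟩
    have h1 : pvOuterA n L (f + 2) state i 1 = pvOuterA n L (f + 1) state (i + n) 0 := by
      simp [pvOuterA, hiL]
    rw [h1]
    by_cases h2 : i + n < L
    · have h3 : pvOuterA n L (f + 1) state (i + n) 0
          = pvOuterA n L f (pvInnerA n L (L - (i + n)).toNat state (i + n) 0).1
              (pvInnerA n L (L - (i + n)).toNat state (i + n) 0).2 1 := by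
        simp [pvOuterA, h2]
      rw [h3]
      obtain ⟨hl, hsnd, hent⟩ :=
        pvInnerA_spec n L (L - (i + n)).toNat state (i + n) 0 (by omega) (le_refl _)
      have hm : max (i + n) (min (i + n + (n - 0)) L) = min (i + 2 * n) L := by omega
      rw [hm] at hsnd hent
      by_cases h4 : i + 2 * n ≤ L
      · rw [show (pvInnerA n L (L - (i + n)).toNat state (i + n) 0).2 = i + 2 * n by omega]
        apply IH f (by omega) (i + 2 * n) (t + 1) _ (by omega) (by rw [hit]; ring)
          (by omega) (by rw [hl, hlen])
        intro k hk
        have hk0 : k < state.length := by rwa [hl] at hk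
        rw [hent k hk0, hinv k hk0]
        by_cases c1 : (k : Int) < i
        · rw [if_neg (by omega), if_pos c1, if_pos (by omega)]
        · by_cases c2 : (k : Int) < i + n
          · rw [if_neg (by omega), if_neg c1, if_pos (by omega)]
            exact (pvTgt_zero n t k hn (by omega) (by omega)).symm
          · by_cases c3 : (k : Int) < i + 2 * n
            · rw [if_pos (by omega), if_pos c3]
              exact (pvTgt_one n t k hn (by omega) (by omega)).symm
            · rw [if_neg (by omega), if_neg c1, if_neg (by omega)]
      · rw [show (pvInnerA n L (L - (i + n)).toNat state (i + n) 0).2 = L by omega,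
          pvOuterA_stop n L f _ L 1 (by omega)]
        apply pv_list_eq_target L _ _ (by rw [hl, hlen])
        intro k hk
        have hk0 : k < state.length := by rwa [hl] at hk
        have hkL : (k : Int) < L := by
          have := hk
          rw [hl, hlen] at this
          omega
        rw [hent k hk0, hinv k hk0]
        by_cases c1 : (k : Int) < i
        · rw [if_neg (by omega), if_pos c1]
        · by_cases c2 : (k : Int) < i + n
          · rw [if_neg (by omega), if_neg c1]
            exact (pvTgt_zero n t k hn (by omega) (by omega)).symm
          · rw [if_pos (by omega)]
            exact (pvTgt_one n t k hn (by omega) (by omega)).symm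
    · rw [pvOuterA_stop n L (f + 1) state (i + n) 0 h2]
      apply pv_list_eq_target L _ _ hlen
      intro k hk
      have hkL : (k : Int) < L := by
        have := hk
        rw [hlen] at this
        omega
      rw [hinv k hk]
      by_cases c1 : (k : Int) < i
      · rw [if_pos c1]
      · rw [if_neg c1]
        exact (pvTgt_zero n t k hn (by omega) (by omega)).symm
  · rw [pvOuterA_stop n L fuel state i 1 hiL]
    apply pv_list_eq_target L _ _ hlen
    intro k hk
    rw [hinv k hk, if_pos (by omega)]

theorem pv_alt_eq (n L : Int) :
    setLedState_alt n L = (List.range L.toNat).map (fun k : Nat => pvTgt n (k : Int)) := by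
  unfold setLedState_alt pvTgt
  rw [PySem.List.pyRange_one, List.map_map]
  simp [Function.comp_def]

-- ===== VERDICT (by name: the statement is the Claim_ definition above) =====
theorem setLedState_spec : Claim_equal_setLedState := by
  intro n L _ hpre
  unfold Spec_setLedState setLedState
  by_cases hn : n ≤ 0
  · have hL : L ≤ 0 := by
      rcases hpre with h | h
      · omega
      · exact h
    have hz : L.toNat = 0 := by omega
    rw [pv_alt_eq, hz]
    simp [pvOuterA, show ¬ (0 : Int) < L by omega]
  · rw [pv_alt_eq]
    apply pvOuterA_eq n L (by omega) (2 * L.toNat + 1) 0 0 _ le_rfl (by ring) (by omega) (by simp)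
    intro k hk
    rw [if_neg (by omega), getElem!_pos (List.replicate L.toNat (0:Int)) k hk, List.getElem_replicate]
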